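-- pv_equiv track=rewrite | github.com/taaha-khan/2023-CompaCT-Image-Compression | src/codec/packbits.py | revert_delta_transform
-- ===== SOURCE A (Python) =====
-- def revert_delta_transform(data):
-- 	output = []
-- 	output.append(data[0])
-- 	for i in range(1, len(data)):
-- 		delta = data[i]
-- 		if delta > 127:
-- 			delta -= 256
-- 		recovered = (output[i - 1] + delta) % 256
-- 		output.append(recovered)
-- 	return output
-- ===== SOURCE B (Python) =====
-- def revert_delta_transform(data):
-- 	first = data[0]
-- 	def solve(prev, lo, hi):
-- 		# recover bytes for data[lo:hi], given the previous recovered byte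
-- 		if hi - lo == 0:
-- 			return []
-- 		if hi - lo == 1:
-- 			d = data[lo]
-- 			if d > 127:
-- 				d -= 256
-- 			return [(prev + d) % 256]
-- 		mid = (lo + hi) // 2
-- 		left = solve(prev, lo, mid)
-- 		right = solve(left[-1], mid, hi)
-- 		return left + right
-- 	return [first] + solve(first, 1, len(data))
-- ===== Notes on version B (the rewrite author's own statement) =====
-- stated objective: alternative
-- what changed: B recovers the bytes by divide-and-conquer: a recursive solve(prev, lo, hi) splits the index range in half, solves the left half, seeds the right half with the left half's last recovered byte, and concatenates, instead of A's single index loop that reads back output[i-1]; correct because each recovered byte depends only on the previous recovered byte, so halves compose.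
import Mathlib
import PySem

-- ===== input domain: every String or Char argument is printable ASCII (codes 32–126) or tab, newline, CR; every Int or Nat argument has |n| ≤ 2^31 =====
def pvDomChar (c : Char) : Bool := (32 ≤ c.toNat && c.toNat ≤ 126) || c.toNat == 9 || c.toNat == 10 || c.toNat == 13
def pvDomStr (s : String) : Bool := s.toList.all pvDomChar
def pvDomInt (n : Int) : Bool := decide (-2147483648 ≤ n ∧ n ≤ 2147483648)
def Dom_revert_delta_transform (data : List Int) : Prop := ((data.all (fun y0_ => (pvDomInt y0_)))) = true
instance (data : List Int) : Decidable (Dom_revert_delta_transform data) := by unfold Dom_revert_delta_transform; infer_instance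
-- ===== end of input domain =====

-- B replaces A's index loop (which reads back output[i-1]) by divide-and-conquer on the index
-- range, seeding each right half with the left half's last recovered byte (alternative, not faster).

-- ===== PORT A =====
def revert_delta_transform (data : List Int) : List Int :=
  let output : List Int := []
  let output := output ++ [PySem.List.pyGetD data 0 0]
  (PySem.List.pyRange 1 (PySem.List.len data) 1).foldl
    (fun output i =>
      let delta := PySem.List.pyGetD data i 0
      let delta := if delta > 127 then delta - 256 else delta
      let recovered := PySem.Int.mod (PySem.List.pyGetD output (i - 1) 0 + delta) 256
      output ++ [recovered]) output

-- ===== PORT B =====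
-- solve(prev, lo, hi) from Source B; lo, hi are the Python slice indices (always ≥ 0 there), so Nat.
def pvSolve (data : List Int) (prev : Int) (lo hi : Nat) : List Int :=
  if hi - lo = 0 then []
  else if hi - lo = 1 then
    let d := PySem.List.pyGetD data (lo : Int) 0
    let d := if d > 127 then d - 256 else d
    [PySem.Int.mod (prev + d) 256]
  else
    let mid := (lo + hi) / 2
    let left := pvSolve data prev lo mid
    let right := pvSolve data (PySem.List.pyGetD left (-1) 0) mid hi
    left ++ right
termination_by hi - lo
decreasing_by all_goals omega

def revert_delta_transform_alt (data : List Int) : List Int :=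
  let first := PySem.List.pyGetD data 0 0
  [first] ++ pvSolve data first 1 data.length

-- ===== PRECONDITION & SPEC =====
-- Pre_ excludes only the empty list, on which Python A raises IndexError (data[0]).
def Pre_revert_delta_transform (data : List Int) : Prop := data ≠ []
instance (data : List Int) : Decidable (Pre_revert_delta_transform data) := by
  unfold Pre_revert_delta_transform; infer_instance
def pvWitness_revert_delta_transform : List Int := [5, 200, 3]
def Spec_revert_delta_transform (data : List Int) (out : List Int) : Prop := out = revert_delta_transform_alt data
instance (data : List Int) (out : List Int) : Decidable (Spec_revert_delta_transform data out) := by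
  unfold Spec_revert_delta_transform; infer_instance

-- ===== CLAIM (what is proved, stated in full; the proofs are below) =====
def Claim_equal_revert_delta_transform : Prop := ∀ (data : List Int), Dom_revert_delta_transform data → Pre_revert_delta_transform data → Spec_revert_delta_transform data (revert_delta_transform data)

-- ===== LEMMAS AND PROOFS =====

def pvAdj (d : Int) : Int := if d > 127 then d - 256 else d

-- reference scan: the recovered bytes for a delta segment, given the previous recovered byte
def pvScan (p : Int) : List Int → List Int
  | [] => []
  | d :: ds => PySem.Int.mod (p + pvAdj d) 256 :: pvScan (PySem.Int.mod (p + pvAdj d) 256) ds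

lemma pvScan_length : ∀ (ds : List Int) (p : Int), (pvScan p ds).length = ds.length := by
  intro ds
  induction ds with
  | nil => intro p; simp [pvScan]
  | cons d ds ih => intro p; simp [pvScan, ih]

lemma pvScan_append : ∀ (xs ys : List Int) (p : Int),
    pvScan p (xs ++ ys) = pvScan p xs ++ pvScan ((pvScan p xs).getLastD p) ys := by
  intro xs
  induction xs with
  | nil => intro ys p; simp [pvScan]
  | cons d xs ih =>
    intro ys p
    simp only [List.cons_append, pvScan, List.getLastD_cons]
    rw [ih]

-- pvSolve computes the reference scan of the delta segment data[lo:hi]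
lemma pvSolve_eq (data : List Int) : ∀ (n lo hi : Nat) (prev : Int), hi - lo = n →
    hi ≤ data.length →
    pvSolve data prev lo hi = pvScan prev ((data.drop lo).take (hi - lo)) := by
  intro n
  induction n using Nat.strong_induction_on with
  | _ n ih =>
    intro lo hi prev hn hhi
    rw [pvSolve]
    by_cases h0 : hi - lo = 0
    · simp [h0, pvScan]
    · by_cases h1 : hi - lo = 1
      · have hlt : lo < data.length := by omega
        have hseg : (data.drop lo).take (hi - lo) = [data[lo]] := by
          rw [h1]
          rw [List.take_one, List.head?_drop]
          simp [List.getElem?_eq_getElem hlt]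
        rw [h1] at hseg
        simp only [h1, if_true, hseg]
        simp [pvScan, pvAdj, List.getD_eq_getElem?_getD, List.getElem?_eq_getElem hlt]
      · simp only [h0, if_false, h1, if_false]
        have hmidlo : lo < (lo + hi) / 2 := by omega
        have hmidhi : (lo + hi) / 2 < hi := by omega
        set mid := (lo + hi) / 2 with hmid
        have hleft := ih (mid - lo) (by omega) lo mid prev rfl (by omega)
        have hlen : (pvScan prev ((data.drop lo).take (mid - lo))).length = mid - lo := by
          rw [pvScan_length]
          simp
          omega
        have hne : pvSolve data prev lo mid ≠ [] := by
          rw [hleft]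
          intro hc
          rw [hc] at hlen
          simp at hlen
          omega
        have hsplit : (data.drop lo).take (hi - lo)
            = (data.drop lo).take (mid - lo) ++ (data.drop mid).take (hi - mid) := by
          have h2 : hi - lo = (mid - lo) + (hi - mid) := by omega
          rw [h2, List.take_add]
          congr 1
          rw [List.drop_drop]
          congr 2
          omega
        rw [hsplit, pvScan_append, hleft]
        have hne2 : pvScan prev ((data.drop lo).take (mid - lo)) ≠ [] := by
          intro hc; rw [hc] at hlen; simp at hlen; omega
        congr 1
        rw [ih (hi - mid) (by omega) mid hi _ rfl hhi]
        congr 1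
        have hpos := List.length_pos_of_ne_nil hne2
        rw [PySem.List.pyGetD_neg_ofNat _ 1 0 (by omega) (by omega)]
        rw [List.getLastD_eq_getLast?, List.getLast?_eq_some_getLast hne2,
          Option.getD_some, List.getLast_eq_getElem]

-- A's loop appends pvScan of the remaining deltas, seeded with the last recovered byte
lemma pvFoldA (data : List Int) : ∀ (n : Nat) (out : List Int) (hne : out ≠ []) (i : Int),
    (out.length : Int) = i → i + n = data.length →
    (PySem.List.pyRange i (data.length : Int) 1).foldl
      (fun output j =>
        output ++ [PySem.Int.mod (PySem.List.pyGetD output (j - 1) 0 +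
          (if PySem.List.pyGetD data j 0 > 127 then PySem.List.pyGetD data j 0 - 256
           else PySem.List.pyGetD data j 0)) 256]) out
    = out ++ pvScan (out.getLast hne) (data.drop i.toNat) := by
  intro n
  induction n with
  | zero =>
    intro out hne i hlen hsum
    have : (PySem.List.pyRange i (data.length : Int) 1) = [] :=
      PySem.List.pyRange_one_eq_nil (by omega)
    rw [this]
    have : data.drop i.toNat = [] := by
      apply List.drop_eq_nil_of_le; omega
    simp [this, pvScan]
  | succ n ih =>
    intro out hne i hlen hsum
    have hone : 1 ≤ i := by
      have := List.length_pos_of_ne_nil hne; omega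
    have hi : i < (data.length : Int) := by omega
    rw [PySem.List.pyRange_one_cons hi, List.foldl_cons]
    have hlast : PySem.List.pyGetD out (i - 1) 0 = out.getLast hne := by
      rw [PySem.List.pyGetD_eq_getElem out 0 (by omega) (by omega)]
      rw [List.getLast_eq_getElem]
      congr 1; omega
    have hdata : PySem.List.pyGetD data i 0 = data[i.toNat]'(by omega) := by
      rw [PySem.List.pyGetD_eq_getElem data 0 (by omega) (by omega)]
    have hdrop : data.drop i.toNat = data[i.toNat]'(by omega) :: data.drop (i.toNat + 1) :=
      List.drop_eq_getElem_cons (by omega)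
    set r := PySem.Int.mod (out.getLast hne + pvAdj (data[i.toNat]'(by omega))) 256 with hr
    have hstep : (out ++ [PySem.Int.mod (PySem.List.pyGetD out (i - 1) 0 +
          (if PySem.List.pyGetD data i 0 > 127 then PySem.List.pyGetD data i 0 - 256
           else PySem.List.pyGetD data i 0)) 256]) = out ++ [r] := by
      rw [hlast, hdata, hr, pvAdj]
    rw [hstep]
    have hne' : out ++ [r] ≠ [] := by simp
    have := ih (out ++ [r]) hne' (i + 1) (by simp; omega) (by omega)
    rw [this]
    have hlast' : (out ++ [r]).getLast hne' = r := by
      simp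
    rw [hlast']
    have hdrop' : data.drop (i + 1).toNat = data.drop (i.toNat + 1) := by
      congr 1; omega
    rw [hdrop', hdrop, pvScan]
    simp [hr]

-- ===== VERDICT (by name: the statement is the Claim_ definition above) =====
theorem revert_delta_transform_spec : Claim_equal_revert_delta_transform := by
  intro data _ hpre
  unfold Spec_revert_delta_transform
  obtain ⟨d0, rest, rfl⟩ : ∃ d0 rest, data = d0 :: rest := by
    cases data with
    | nil => exact absurd rfl hpre
    | cons a l => exact ⟨a, l, rfl⟩
  unfold revert_delta_transform revert_delta_transform_alt
  simp only [List.nil_append, PySem.List.len_eq, PySem.List.pyGetD_zero_cons]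
  have hA := pvFoldA (d0 :: rest) rest.length [d0] (by simp) 1 (by simp) (by simp; omega)
  simp only [List.length_cons] at hA ⊢
  rw [hA]
  rw [pvSolve_eq (d0 :: rest) rest.length 1 (rest.length + 1) d0 (by omega) (by simp)]
  simp only [List.getLast_singleton, List.singleton_append]
  have h1 : (d0 :: rest).drop (1 : Int).toNat = rest := rfl
  have h2 : ((d0 :: rest).drop 1).take (rest.length + 1 - 1) = rest := by simp
  rw [h1, h2]
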